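-- pv_equiv track=rewrite | github.com/lsh0107/solving_algorithms | 프로그래머스/1/133499. 옹알이 （2）/옹알이 （2）.py | solution
-- ===== SOURCE A (Python) =====
-- def solution(babbling):
--     answer = 0
--     languages = ["aya", "ye", "woo", "ma"]
--
--     for bab in babbling:
--         s = ''
--         stack = []
--         for idx, char in enumerate(bab):
--             s += char
--
--             # if len(stack) != 0 and s == stack[-1]:
--             #     answer -= 1
--             real_s = s
--             if s in languages:
--                 if stack and stack[-1] == s:
--                     stack = []
--                     break
--                 else:
--                     stack.append(s)
--                     s = ''
--
--             if stack and len(s) >= 1 and (len(bab) - idx <= 1):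
--                 stack = []
--         if stack:
--             answer += 1
--
--     return answer
-- ===== SOURCE B (Python) =====
-- def solution(babbling):
--     tokens = ("aya", "ye", "woo", "ma")
--
--     def ok(w):
--         prev = None
--         while w:
--             for t in tokens:
--                 if t != prev and w.startswith(t):
--                     prev = t
--                     w = w[len(t):]
--                     break
--             else:
--                 return False
--         return prev is not None
--
--     return sum(ok(w) for w in babbling)
-- ===== Notes on version B (the rewrite author's own statement) =====
-- stated objective: simpler
-- what changed: Replaces A's per-character scan that accumulates a chunk string, maintains a stack of matched tokens and clears it via last-index bookkeeping by a token-level scan that repeatedly strips the matching token prefix with startswith, forbidding an immediate repeat of the previous token.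
import Mathlib
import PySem

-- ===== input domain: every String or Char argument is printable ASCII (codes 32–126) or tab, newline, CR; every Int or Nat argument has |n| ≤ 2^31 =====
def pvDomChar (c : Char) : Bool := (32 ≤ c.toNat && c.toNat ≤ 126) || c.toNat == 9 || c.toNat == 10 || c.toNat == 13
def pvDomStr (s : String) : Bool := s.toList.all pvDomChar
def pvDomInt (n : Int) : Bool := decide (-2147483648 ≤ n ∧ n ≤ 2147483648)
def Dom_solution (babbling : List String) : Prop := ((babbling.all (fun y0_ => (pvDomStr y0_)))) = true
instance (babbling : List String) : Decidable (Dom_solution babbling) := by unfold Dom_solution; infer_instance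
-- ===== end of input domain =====

-- B replaces A's per-character scan (stack + last-index bookkeeping) by a token-level scan
-- that repeatedly strips the matching non-repeated token prefix; objective: simpler.

-- ===== PORT A =====
def pvLangs : List String := ["aya", "ye", "woo", "ma"]

-- inner `for idx, char in enumerate(bab)` loop of A; returns the final `stack`
-- (`break` is modelled by returning immediately; Python's `stack = []; break` returns []).
def solGo (n : Int) (idx : Int) (cs : List Char) (s : String) (stack : List String) :
    List String :=
  match cs with
  | [] => stack
  | c :: rest =>
    let s := s.push c
    if s ∈ pvLangs then
      if stack ≠ [] ∧ stack.getLast? = some s then []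
      else
        let stack := stack ++ [s]
        let s := ""
        let stack := if stack ≠ [] ∧ 1 ≤ s.length ∧ n - idx ≤ 1 then [] else stack
        solGo n (idx + 1) rest s stack
    else
      let stack := if stack ≠ [] ∧ 1 ≤ s.length ∧ n - idx ≤ 1 then [] else stack
      solGo n (idx + 1) rest s stack

def solution (babbling : List String) : Int :=
  babbling.foldl
    (fun answer bab =>
      let stack := solGo (bab.toList.length : Int) 0 bab.toList "" []
      if stack ≠ [] then answer + 1 else answer)
    0

-- ===== PORT B =====
-- the `while w:` loop of B's helper `ok`; the `for … else` is the find? of the first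
-- token that is not the previous one and is a prefix of the remaining word.
def okAux (w : List Char) (prev : Option String) : Bool :=
  if hw : w = [] then prev.isSome
  else
    match hf : (["aya", "ye", "woo", "ma"] : List String).find? (fun t => (some t != prev) && t.toList.isPrefixOf w) with
    | none => false
    | some t => okAux (w.drop t.toList.length) (some t)
termination_by w.length
decreasing_by
  have hmem := List.mem_of_find?_eq_some hf
  have hp := List.find?_some hf
  have ht : 0 < t.toList.length := by
    simp at hmem
    rcases hmem with h | h | h | h <;> subst h <;> decide
  have hw' : w ≠ [] := hw
  have : 0 < w.length := List.length_pos_iff.mpr hw'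
  rw [List.length_drop]
  omega

def solution_alt (babbling : List String) : Int :=
  babbling.foldl (fun acc w => acc + (if okAux w.toList none then 1 else 0)) 0

-- ===== PRECONDITION & SPEC =====
def Spec_solution (babbling : List String) (out : Int) : Prop := out = solution_alt babbling
instance (babbling : List String) (out : Int) : Decidable (Spec_solution babbling out) := by unfold Spec_solution; infer_instance

-- ===== CLAIM (what is proved, stated in full; the proofs are below) =====
def Claim_equal_solution : Prop := ∀ (babbling : List String), Dom_solution babbling → Spec_solution babbling (solution babbling)

-- ===== LEMMAS AND PROOFS =====

lemma solGo_step_skip (n idx : Int) (c : Char) (rest : List Char) (s : String)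
    (stack : List String) (h1 : s.push c ∉ pvLangs) (h2 : ¬ (n - idx ≤ 1)) :
    solGo n idx (c :: rest) s stack = solGo n (idx + 1) rest (s.push c) stack := by
  simp only [solGo]
  rw [if_neg h1, if_neg (by tauto)]

lemma solGo_step_match_rep (n idx : Int) (c : Char) (rest : List Char) (s : String)
    (stack : List String) (h1 : s.push c ∈ pvLangs) (h2 : stack ≠ [])
    (h3 : stack.getLast? = some (s.push c)) :
    solGo n idx (c :: rest) s stack = [] := by
  simp only [solGo]
  rw [if_pos h1, if_pos ⟨h2, h3⟩]

lemma solGo_step_match (n idx : Int) (c : Char) (rest : List Char) (s : String)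
    (stack : List String) (h1 : s.push c ∈ pvLangs)
    (h2 : ¬ (stack ≠ [] ∧ stack.getLast? = some (s.push c))) :
    solGo n idx (c :: rest) s stack = solGo n (idx + 1) rest "" (stack ++ [s.push c]) := by
  simp only [solGo]
  rw [if_pos h1, if_neg h2]
  simp

lemma okAux_nil (prev : Option String) : okAux [] prev = prev.isSome := by
  rw [okAux]; simp

lemma okAux_none (w : List Char) (prev : Option String) (hw : w ≠ [])
    (hall : ∀ t ∈ (["aya", "ye", "woo", "ma"] : List String), ((some t != prev) && t.toList.isPrefixOf w) = false) :
    okAux w prev = false := by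
  rw [okAux]
  simp only [hw, dite_false]
  rw [List.find?_eq_none.mpr (by intro t ht; simp [hall t ht])]

lemma okAux_found (w : List Char) (prev : Option String) (t : String)
    (hw : w ≠ [])
    (hf : (["aya", "ye", "woo", "ma"] : List String).find? (fun t => (some t != prev) && t.toList.isPrefixOf w) = some t) :
    okAux w prev = okAux (w.drop t.toList.length) (some t) := by
  rw [okAux]
  simp only [hw, dite_false]
  rw [hf]

-- if no token is a prefix of what remains to be scanned (including the already
-- accumulated chunk s), A's inner loop ends with an empty stack
lemma solGo_dead : ∀ (cs : List Char), cs ≠ [] → ∀ (n idx : Int) (s : String) (stack : List String),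
    n = idx + cs.length →
    (∀ t ∈ pvLangs, ¬ (t.toList <+: (s.toList ++ cs))) →
    solGo n idx cs s stack = [] := by
  intro cs
  induction cs with
  | nil => intro h; exact absurd rfl h
  | cons c rest ih =>
    intro _ n idx s stack hn hpre
    have hnm : s.push c ∉ pvLangs := by
      intro hmem
      exact hpre _ hmem ⟨rest, by simp⟩
    by_cases hr : rest = []
    · subst hr
      simp only [solGo]
      rw [if_neg hnm]
      rcases stack with _ | ⟨x, xs⟩
      · simp
      · have hc : (x :: xs ≠ [] ∧ 1 ≤ (s.push c).length ∧ n - idx ≤ 1) := by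
          refine ⟨by simp, by simp [String.length_push], ?_⟩
          simp only [List.length_cons, List.length_nil] at hn
          omega
        rw [if_pos hc]
    · have hnle : ¬ (n - idx ≤ 1) := by
        have := List.length_pos_iff.mpr hr
        simp only [List.length_cons] at hn
        push_cast at hn
        omega
      rw [solGo_step_skip n idx c rest s stack hnm hnle]
      apply ih hr
      · simp only [List.length_cons] at hn ⊢
        push_cast at hn ⊢
        omega
      · intro t ht
        have := hpre t ht
        simpa using this

-- key per-word lemma: A's stack is nonempty iff B accepts the word
lemma solGo_okAux : ∀ (fuel : Nat) (cs : List Char), cs.length ≤ fuel →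
    ∀ (n idx : Int) (stack : List String) (prev : Option String),
    n = idx + cs.length → stack.getLast? = prev →
    (solGo n idx cs "" stack ≠ [] ↔ okAux cs prev = true) := by
  intro fuel
  induction fuel with
  | zero =>
    intro cs hlen n idx stack prev hn hprev
    have hnil : cs = [] := List.length_eq_zero_iff.mp (Nat.le_zero.mp hlen)
    subst hnil
    simp only [solGo, okAux_nil, ← hprev]
    cases stack using List.reverseRecOn <;> simp
  | succ fuel ih =>
    intro cs hlen n idx stack prev hn hprev
    rcases hcs : cs with _ | ⟨c0, rest0⟩
    · subst hcs
      simp only [solGo, okAux_nil, ← hprev]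
      cases stack using List.reverseRecOn <;> simp
    · subst hcs
      by_cases hp : ∃ t ∈ pvLangs, t.toList <+: (c0 :: rest0)
      · obtain ⟨t, hmem, hpre⟩ := hp
        obtain ⟨r, hr⟩ := hpre
        simp only [pvLangs, List.mem_cons, List.not_mem_nil, or_false] at hmem
        rcases hmem with h | h | h | h <;> subst h
        · -- token "aya"
          rw [show ("aya" : String).toList = ['a', 'y', 'a'] from by decide] at hr
          rw [← hr] at hlen hn ⊢
          simp only [List.cons_append, List.nil_append] at hlen hn ⊢
          simp only [List.length_cons] at hlen hn
          push_cast at hn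
          rw [solGo_step_skip n (idx) 'a' ('y'::'a'::r) "" stack (by decide) (by omega)]
          rw [solGo_step_skip n (idx + 1) 'y' ('a'::r) ("".push 'a') stack (by decide) (by omega)]
          have hfull : (("".push 'a').push 'y').push 'a' = "aya" := by decide
          by_cases hrep : stack ≠ [] ∧ stack.getLast? = some ((("".push 'a').push 'y').push 'a')
          · rw [solGo_step_match_rep n (idx + 1 + 1) 'a' r (("".push 'a').push 'y') stack (by decide) hrep.1 hrep.2]
            have hpv : prev = some "aya" := by rw [← hprev, hrep.2, hfull]
            rw [okAux_none _ _ (by simp)]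
            · simp
            · intro t ht
              simp only [List.mem_cons, List.not_mem_nil, or_false] at ht
              rcases ht with h | h | h | h <;> subst h <;>
                simp [List.isPrefixOf, hpv]
          · rw [solGo_step_match n (idx + 1 + 1) 'a' r (("".push 'a').push 'y') stack (by decide) hrep, hfull]
            have hpv : some "aya" ≠ prev := by
              rw [← hprev]
              rcases stack with _ | ⟨x, xs⟩
              · simp
              · intro h
                exact hrep ⟨by simp, by rw [← h, hfull]⟩
            have hb : (some "aya" != prev) = true := by simpa [bne_iff_ne] using hpv
            have hfind : (["aya", "ye", "woo", "ma"] : List String).find? (fun t => (some t != prev) && t.toList.isPrefixOf ('a'::'y'::'a'::r)) = some "aya" := by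
              simp [List.find?, List.isPrefixOf, hb]
            rw [okAux_found _ _ "aya" (by simp) hfind]
            rw [show (('a'::'y'::'a'::r).drop "aya".toList.length) = r from by simp]
            exact ih r (by omega) n (idx + 1 + 1 + 1) (stack ++ ["aya"]) (some "aya")
              (by push_cast; omega) (by simp)
        · -- token "ye"
          rw [show ("ye" : String).toList = ['y', 'e'] from by decide] at hr
          rw [← hr] at hlen hn ⊢
          simp only [List.cons_append, List.nil_append] at hlen hn ⊢
          simp only [List.length_cons] at hlen hn
          push_cast at hn
          rw [solGo_step_skip n (idx) 'y' ('e'::r) "" stack (by decide) (by omega)]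
          have hfull : ("".push 'y').push 'e' = "ye" := by decide
          by_cases hrep : stack ≠ [] ∧ stack.getLast? = some (("".push 'y').push 'e')
          · rw [solGo_step_match_rep n (idx + 1) 'e' r ("".push 'y') stack (by decide) hrep.1 hrep.2]
            have hpv : prev = some "ye" := by rw [← hprev, hrep.2, hfull]
            rw [okAux_none _ _ (by simp)]
            · simp
            · intro t ht
              simp only [List.mem_cons, List.not_mem_nil, or_false] at ht
              rcases ht with h | h | h | h <;> subst h <;>
                simp [List.isPrefixOf, hpv]
          · rw [solGo_step_match n (idx + 1) 'e' r ("".push 'y') stack (by decide) hrep, hfull]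
            have hpv : some "ye" ≠ prev := by
              rw [← hprev]
              rcases stack with _ | ⟨x, xs⟩
              · simp
              · intro h
                exact hrep ⟨by simp, by rw [← h, hfull]⟩
            have hb : (some "ye" != prev) = true := by simpa [bne_iff_ne] using hpv
            have hfind : (["aya", "ye", "woo", "ma"] : List String).find? (fun t => (some t != prev) && t.toList.isPrefixOf ('y'::'e'::r)) = some "ye" := by
              simp [List.find?, List.isPrefixOf, hb]
            rw [okAux_found _ _ "ye" (by simp) hfind]
            rw [show (('y'::'e'::r).drop "ye".toList.length) = r from by simp]
            exact ih r (by omega) n (idx + 1 + 1) (stack ++ ["ye"]) (some "ye")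
              (by push_cast; omega) (by simp)
        · -- token "woo"
          rw [show ("woo" : String).toList = ['w', 'o', 'o'] from by decide] at hr
          rw [← hr] at hlen hn ⊢
          simp only [List.cons_append, List.nil_append] at hlen hn ⊢
          simp only [List.length_cons] at hlen hn
          push_cast at hn
          rw [solGo_step_skip n (idx) 'w' ('o'::'o'::r) "" stack (by decide) (by omega)]
          rw [solGo_step_skip n (idx + 1) 'o' ('o'::r) ("".push 'w') stack (by decide) (by omega)]
          have hfull : (("".push 'w').push 'o').push 'o' = "woo" := by decide
          by_cases hrep : stack ≠ [] ∧ stack.getLast? = some ((("".push 'w').push 'o').push 'o')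
          · rw [solGo_step_match_rep n (idx + 1 + 1) 'o' r (("".push 'w').push 'o') stack (by decide) hrep.1 hrep.2]
            have hpv : prev = some "woo" := by rw [← hprev, hrep.2, hfull]
            rw [okAux_none _ _ (by simp)]
            · simp
            · intro t ht
              simp only [List.mem_cons, List.not_mem_nil, or_false] at ht
              rcases ht with h | h | h | h <;> subst h <;>
                simp [List.isPrefixOf, hpv]
          · rw [solGo_step_match n (idx + 1 + 1) 'o' r (("".push 'w').push 'o') stack (by decide) hrep, hfull]
            have hpv : some "woo" ≠ prev := by
              rw [← hprev]
              rcases stack with _ | ⟨x, xs⟩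
              · simp
              · intro h
                exact hrep ⟨by simp, by rw [← h, hfull]⟩
            have hb : (some "woo" != prev) = true := by simpa [bne_iff_ne] using hpv
            have hfind : (["aya", "ye", "woo", "ma"] : List String).find? (fun t => (some t != prev) && t.toList.isPrefixOf ('w'::'o'::'o'::r)) = some "woo" := by
              simp [List.find?, List.isPrefixOf, hb]
            rw [okAux_found _ _ "woo" (by simp) hfind]
            rw [show (('w'::'o'::'o'::r).drop "woo".toList.length) = r from by simp]
            exact ih r (by omega) n (idx + 1 + 1 + 1) (stack ++ ["woo"]) (some "woo")
              (by push_cast; omega) (by simp)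
        · -- token "ma"
          rw [show ("ma" : String).toList = ['m', 'a'] from by decide] at hr
          rw [← hr] at hlen hn ⊢
          simp only [List.cons_append, List.nil_append] at hlen hn ⊢
          simp only [List.length_cons] at hlen hn
          push_cast at hn
          rw [solGo_step_skip n (idx) 'm' ('a'::r) "" stack (by decide) (by omega)]
          have hfull : ("".push 'm').push 'a' = "ma" := by decide
          by_cases hrep : stack ≠ [] ∧ stack.getLast? = some (("".push 'm').push 'a')
          · rw [solGo_step_match_rep n (idx + 1) 'a' r ("".push 'm') stack (by decide) hrep.1 hrep.2]
            have hpv : prev = some "ma" := by rw [← hprev, hrep.2, hfull]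
            rw [okAux_none _ _ (by simp)]
            · simp
            · intro t ht
              simp only [List.mem_cons, List.not_mem_nil, or_false] at ht
              rcases ht with h | h | h | h <;> subst h <;>
                simp [List.isPrefixOf, hpv]
          · rw [solGo_step_match n (idx + 1) 'a' r ("".push 'm') stack (by decide) hrep, hfull]
            have hpv : some "ma" ≠ prev := by
              rw [← hprev]
              rcases stack with _ | ⟨x, xs⟩
              · simp
              · intro h
                exact hrep ⟨by simp, by rw [← h, hfull]⟩
            have hb : (some "ma" != prev) = true := by simpa [bne_iff_ne] using hpv
            have hfind : (["aya", "ye", "woo", "ma"] : List String).find? (fun t => (some t != prev) && t.toList.isPrefixOf ('m'::'a'::r)) = some "ma" := by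
              simp [List.find?, List.isPrefixOf, hb]
            rw [okAux_found _ _ "ma" (by simp) hfind]
            rw [show (('m'::'a'::r).drop "ma".toList.length) = r from by simp]
            exact ih r (by omega) n (idx + 1 + 1) (stack ++ ["ma"]) (some "ma")
              (by push_cast; omega) (by simp)
      · push Not at hp
        rw [solGo_dead (c0 :: rest0) (by simp) n idx "" stack hn (by simpa using hp)]
        rw [okAux_none _ _ (by simp)]
        · simp
        · intro t ht
          have htl : t ∈ pvLangs := by simpa [pvLangs] using ht
          have hnp : t.toList.isPrefixOf (c0 :: rest0) = false := by
            rw [Bool.eq_false_iff]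
            intro hb
            exact hp t htl (List.isPrefixOf_iff_prefix.mp hb)
          simp [hnp]

lemma foldl_eq : ∀ (bs : List String) (a : Int),
    bs.foldl
      (fun answer bab =>
        let stack := solGo (bab.toList.length : Int) 0 bab.toList "" []
        if stack ≠ [] then answer + 1 else answer) a =
    bs.foldl (fun acc w => acc + (if okAux w.toList none then 1 else 0)) a := by
  intro bs
  induction bs with
  | nil => intro a; rfl
  | cons b bs ih =>
    intro a
    simp only [List.foldl_cons]
    rw [← ih]
    congr 1
    have key := solGo_okAux b.toList.length b.toList le_rfl (b.toList.length : Int) 0 [] none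
      (by push_cast; omega) rfl
    by_cases h : okAux b.toList none = true
    · rw [if_pos (key.mpr h), h, if_pos rfl]
    · rw [if_neg (fun hne => h (key.mp hne))]
      simp at h
      rw [h]
      simp

-- ===== VERDICT (by name: the statement is the Claim_ definition above) =====
theorem solution_spec : Claim_equal_solution := by
  intro babbling _
  unfold Spec_solution solution solution_alt
  exact foldl_eq babbling 0
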